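-- pv_equiv track=rewrite | github.com/Alfaqeehalandalosi/Cyber-threat-monitoring-system | ctms/analysis/advanced_threat_analyzer.py | classify_threat_type
-- ===== SOURCE A (Python) =====
-- from typing import List, Dict, Any, Optional, Tuple
--
-- def classify_threat_type(article: Dict[str, Any]) -> str:
--     """Classify threat type using advanced analysis"""
--     text = f"{article.get('title', '')} {article.get('content', '')}"
--     text_lower = text.lower()
--
--     # Priority-based classification
--     if any(word in text_lower for word in ['zero-day', '0day', 'zero day']):
--         return 'zero_day'
--     elif any(word in text_lower for word in ['remote code execution', 'RCE', 'code execution']):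
--         return 'remote_code_execution'
--     elif any(word in text_lower for word in ['data breach', 'leak', 'stolen', 'compromised']):
--         return 'data_breach'
--     elif any(word in text_lower for word in ['malware', 'ransomware', 'trojan', 'virus']):
--         return 'malware'
--     elif any(word in text_lower for word in ['exploit', 'PoC', 'proof of concept']):
--         return 'exploit'
--     elif any(word in text_lower for word in ['vulnerability', 'CVE', 'security flaw']):
--         return 'vulnerability'
--     elif any(word in text_lower for word in ['phishing', 'social engineering']):
--         return 'social_engineering'
--     else:
--         return 'general_threat'
-- ===== SOURCE B (Python) =====
-- _TYPES = ['zero_day', 'remote_code_execution', 'data_breach', 'malware',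
--           'exploit', 'vulnerability', 'social_engineering']
--
-- _KEYWORDS = [
--     ('zero-day', 0), ('0day', 0), ('zero day', 0),
--     ('remote code execution', 1), ('RCE', 1), ('code execution', 1),
--     ('data breach', 2), ('leak', 2), ('stolen', 2), ('compromised', 2),
--     ('malware', 3), ('ransomware', 3), ('trojan', 3), ('virus', 3),
--     ('exploit', 4), ('PoC', 4), ('proof of concept', 4),
--     ('vulnerability', 5), ('CVE', 5), ('security flaw', 5),
--     ('phishing', 6), ('social engineering', 6),
-- ]
--
-- def classify_threat_type(article):
--     """Test every keyword, then return the type of the minimal matched priority."""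
--     text_lower = f"{article.get('title', '')} {article.get('content', '')}".lower()
--     hits = [i for kw, i in _KEYWORDS if kw in text_lower]
--     return _TYPES[min(hits)] if hits else 'general_threat'
-- ===== Notes on version B (the rewrite author's own statement) =====
-- stated objective: alternative
-- what changed: B flattens all keywords into (keyword, priority) pairs, tests every one of them, collects the matched priorities and returns the type of the minimum matched priority, replacing A's short-circuiting if/elif ladder with a collect-then-minimize pass (correct because the first rule A's chain hits is exactly the minimal-index rule that matches).
import Mathlib
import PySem

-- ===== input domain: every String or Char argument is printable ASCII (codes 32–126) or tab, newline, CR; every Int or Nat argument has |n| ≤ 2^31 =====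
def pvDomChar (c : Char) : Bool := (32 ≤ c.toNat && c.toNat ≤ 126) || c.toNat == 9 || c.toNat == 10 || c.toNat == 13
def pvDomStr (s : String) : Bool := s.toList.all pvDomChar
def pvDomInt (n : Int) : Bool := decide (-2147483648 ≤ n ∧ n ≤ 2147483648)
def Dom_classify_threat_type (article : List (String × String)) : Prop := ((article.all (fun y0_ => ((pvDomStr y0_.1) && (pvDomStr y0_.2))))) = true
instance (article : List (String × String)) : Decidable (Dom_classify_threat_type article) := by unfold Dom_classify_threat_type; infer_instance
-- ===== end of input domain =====

-- B replaces A's short-circuiting if/elif ladder by a collect-then-minimize pass over a flat (keyword, priority) table: an alternative decomposition of the same cost.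


-- ===== PORT A =====
def classify_threat_type (article : List (String × String)) : String :=
  -- text = f"{article.get('title','')} {article.get('content','')}"
  let text := String.mk (((PySem.Dict.mk article).getD "title" "").toList ++ ' ' :: ((PySem.Dict.mk article).getD "content" "").toList)
  let text_lower := PySem.Str.lower text
  if ["zero-day", "0day", "zero day"].any (fun w => PySem.Str.isIn w text_lower) then "zero_day"
  else if ["remote code execution", "RCE", "code execution"].any (fun w => PySem.Str.isIn w text_lower) then "remote_code_execution"
  else if ["data breach", "leak", "stolen", "compromised"].any (fun w => PySem.Str.isIn w text_lower) then "data_breach"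
  else if ["malware", "ransomware", "trojan", "virus"].any (fun w => PySem.Str.isIn w text_lower) then "malware"
  else if ["exploit", "PoC", "proof of concept"].any (fun w => PySem.Str.isIn w text_lower) then "exploit"
  else if ["vulnerability", "CVE", "security flaw"].any (fun w => PySem.Str.isIn w text_lower) then "vulnerability"
  else if ["phishing", "social engineering"].any (fun w => PySem.Str.isIn w text_lower) then "social_engineering"
  else "general_threat"

-- ===== PORT B =====
-- Source B's _TYPES
def pvTypes : List String :=
  ["zero_day", "remote_code_execution", "data_breach", "malware",
   "exploit", "vulnerability", "social_engineering"]

-- Source B's flat _KEYWORDS table: (keyword, priority index)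
def pvKeywords : List (String × Nat) :=
  [ ("zero-day", 0), ("0day", 0), ("zero day", 0)
  , ("remote code execution", 1), ("RCE", 1), ("code execution", 1)
  , ("data breach", 2), ("leak", 2), ("stolen", 2), ("compromised", 2)
  , ("malware", 3), ("ransomware", 3), ("trojan", 3), ("virus", 3)
  , ("exploit", 4), ("PoC", 4), ("proof of concept", 4)
  , ("vulnerability", 5), ("CVE", 5), ("security flaw", 5)
  , ("phishing", 6), ("social engineering", 6) ]

-- the comprehension 'hits = [i for kw, i in _KEYWORDS if kw in text_lower]'
def pvHits (pairs : List (String × Nat)) (text_lower : String) : List Nat :=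
  pairs.foldr (fun p acc => if PySem.Str.isIn p.1 text_lower then p.2 :: acc else acc) []

def classify_threat_type_alt (article : List (String × String)) : String :=
  let text_lower := PySem.Str.lower (String.mk (((PySem.Dict.mk article).getD "title" "").toList ++ ' ' :: ((PySem.Dict.mk article).getD "content" "").toList))
  let hits := pvHits pvKeywords text_lower
  -- '_TYPES[min(hits)] if hits else ...': indices in _KEYWORDS are all in range of _TYPES, so pyGetD with default is exact
  match PySem.List.min? hits (fun x => x) with
  | some i => pvTypes.getD i "general_threat"
  | none => "general_threat"

-- ===== PRECONDITION & SPEC =====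
def Spec_classify_threat_type (article : List (String × String)) (out : String) : Prop := out = classify_threat_type_alt article
instance (article : List (String × String)) (out : String) : Decidable (Spec_classify_threat_type article out) := by unfold Spec_classify_threat_type; infer_instance

-- ===== CLAIM (what is proved, stated in full; the proofs are below) =====
def Claim_equal_classify_threat_type : Prop := ∀ (article : List (String × String)), Dom_classify_threat_type article → Spec_classify_threat_type article (classify_threat_type article)

-- ===== LEMMAS AND PROOFS =====

-- A's rule table, grouped, used only by the proof to relate the chain to the flat table
def pvRules : List (String × List String) :=
  [ ("zero_day", ["zero-day", "0day", "zero day"])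
  , ("remote_code_execution", ["remote code execution", "RCE", "code execution"])
  , ("data_breach", ["data breach", "leak", "stolen", "compromised"])
  , ("malware", ["malware", "ransomware", "trojan", "virus"])
  , ("exploit", ["exploit", "PoC", "proof of concept"])
  , ("vulnerability", ["vulnerability", "CVE", "security flaw"])
  , ("social_engineering", ["phishing", "social engineering"]) ]

def pvFlat : List (String × List String) → Nat → List (String × Nat)
  | [], _ => []
  | (_, kws) :: rest, n => kws.map (fun w => (w, n)) ++ pvFlat rest (n + 1)

def pvFirst : List (String × List String) → Nat → String → Option Nat
  | [], _, _ => none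
  | (_, kws) :: rest, n, t =>
      if kws.any (fun w => PySem.Str.isIn w t) then some n else pvFirst rest (n + 1) t

theorem pvHits_append (a b : List (String × Nat)) (t : String) :
    pvHits (a ++ b) t = pvHits a t ++ pvHits b t := by
  induction a with
  | nil => rfl
  | cons p rest ih =>
      simp only [pvHits, List.foldr_cons, List.cons_append] at ih ⊢
      rw [ih]; split_ifs <;> rfl

theorem pvHits_map (kws : List String) (n : Nat) (t : String) :
    pvHits (kws.map (fun w => (w, n))) t = (kws.filter (fun w => PySem.Str.isIn w t)).map (fun _ => n) := by
  induction kws with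
  | nil => rfl
  | cons w rest ih =>
      simp only [pvHits, List.map_cons, List.foldr_cons, List.filter_cons] at *
      split_ifs <;> simp_all

theorem pvHits_flat_ge (rules : List (String × List String)) (n : Nat) (t : String) :
    ∀ x ∈ pvHits (pvFlat rules n) t, n ≤ x := by
  induction rules generalizing n with
  | nil => simp [pvFlat, pvHits]
  | cons p rest ih =>
      intro x hx
      rw [pvFlat, pvHits_append, pvHits_map] at hx
      rcases List.mem_append.1 hx with h | h
      · obtain ⟨_, _, rfl⟩ := List.mem_map.1 h; exact le_refl n
      · exact Nat.le_of_succ_le (ih (n + 1) x h)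

theorem foldl_min_of_ge (l : List ℕ) (a : ℕ) (h : ∀ x ∈ l, a ≤ x) : l.foldl min a = a := by
  induction l with
  | nil => rfl
  | cons x rest ih =>
      simp only [List.foldl_cons]
      rw [min_eq_left (h x (by simp))]
      exact ih (fun y hy => h y (by simp [hy]))

theorem pvMin_hits_flat (rules : List (String × List String)) (n : Nat) (t : String) :
    PySem.List.min? (pvHits (pvFlat rules n) t) (fun x => x) = pvFirst rules n t := by
  induction rules generalizing n with
  | nil => rfl
  | cons p rest ih =>
      rw [pvFlat, pvHits_append, pvHits_map, pvFirst]
      by_cases h : p.2.any (fun w => PySem.Str.isIn w t)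
      · rw [if_pos h]
        obtain ⟨w, hw, hin⟩ := List.any_eq_true.1 h
        have hne : p.2.filter (fun w => PySem.Str.isIn w t) ≠ [] := by
          intro hnil
          have := List.filter_eq_nil_iff.1 hnil w hw
          rw [hin] at this; exact this rfl
        obtain ⟨v, vs, hvvs⟩ := List.exists_cons_of_ne_nil hne
        rw [hvvs, List.map_cons, List.cons_append, PySem.List.min?_id_cons]
        congr 1
        apply foldl_min_of_ge
        intro x hx
        rcases List.mem_append.1 hx with hx | hx
        · obtain ⟨_, _, rfl⟩ := List.mem_map.1 hx; exact le_refl n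
        · exact Nat.le_of_succ_le (pvHits_flat_ge rest (n + 1) t x hx)
      · rw [if_neg h]
        have : p.2.filter (fun w => PySem.Str.isIn w t) = [] := by
          rw [List.filter_eq_nil_iff]
          intro w hw
          have := List.any_eq_false.1 (Bool.eq_false_iff.2 h) w hw
          simpa using this
        rw [this, List.map_nil, List.nil_append]
        exact ih (n + 1)

theorem pvChain_eq (article : List (String × String)) :
    classify_threat_type article = classify_threat_type_alt article := by
  unfold classify_threat_type classify_threat_type_alt
  simp only []
  rw [show pvKeywords = pvFlat pvRules 0 from rfl, pvMin_hits_flat]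
  simp only [pvRules, pvFirst]
  split_ifs <;> rfl

-- ===== VERDICT (by name: the statement is the Claim_ definition above) =====
theorem classify_threat_type_spec : Claim_equal_classify_threat_type := by
  intro article _
  exact pvChain_eq article
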